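-- pv_equiv track=rewrite | github.com/shCHO9801/Python_Study | 조성현/python/programmers/입문/다항식 더하기.py | solution
-- ===== SOURCE A (Python) =====
-- def solution(strc):
--     answer = ''
--     strc+=' '
--     x = 0
--     num = 0
--     tmp = ''
--     for i in strc:
--         if i == '+':
--             continue
--         if i == ' ':
--             if 'x' in tmp:
--                 if len(tmp) == 1:
--                     x+=1
--                 else:
--                     tmp2 = ''.join(j for j in tmp if j != 'x')
--                     x+=int(tmp2)
--             elif tmp!='':
--                 num+=int(tmp)
--             tmp = ''
--         else:
--             tmp+=i
--     if x!=0: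
--         if x==1:
--             answer+='x'
--         else:
--             answer+=str(x)+'x'
--         if num!=0:
--             answer+=' + '
--     if num!=0:
--         answer+=str(num)
--     return answer
-- ===== SOURCE B (Python) =====
-- def solution(strc):
--     tokens = strc.replace('+', '').split(' ')
--     x = sum(1 if t == 'x' else int(t.replace('x', '')) for t in tokens if 'x' in t)
--     num = sum(int(t) for t in tokens if t and 'x' not in t)
--     parts = []
--     if x != 0:
--         parts.append('x' if x == 1 else str(x) + 'x')
--     if num != 0:
--         parts.append(str(num))
--     return ' + '.join(parts)
-- ===== Notes on version B (the rewrite author's own statement) =====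
-- stated objective: idiomatic
-- what changed: B splits the plus-stripped string into tokens once, computes the x-coefficient and the constant as two separate comprehension sums over the token list, and formats by joining a parts list with the plus separator, instead of A's single character-by-character loop with a trailing-space sentinel, a mutable partial-token buffer and cascading string appends.
import Mathlib
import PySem

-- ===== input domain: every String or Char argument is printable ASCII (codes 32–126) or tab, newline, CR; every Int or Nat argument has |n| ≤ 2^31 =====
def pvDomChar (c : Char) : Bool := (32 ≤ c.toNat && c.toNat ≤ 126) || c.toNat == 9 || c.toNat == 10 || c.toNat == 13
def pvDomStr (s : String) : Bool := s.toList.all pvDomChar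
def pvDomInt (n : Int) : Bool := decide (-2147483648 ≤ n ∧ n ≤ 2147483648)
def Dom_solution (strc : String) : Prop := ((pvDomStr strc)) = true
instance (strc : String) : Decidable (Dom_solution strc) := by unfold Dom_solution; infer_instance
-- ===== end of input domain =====

-- B drops every plus character, splits into tokens once, computes the x-coefficient and the constant as two
-- comprehension sums over that token list, and formats by joining a parts list with the plus separator,
-- instead of A's per-character loop with a trailing-space sentinel and mutable accumulators
-- (objective: idiomatic).

-- ===== PORT A =====
-- A's flush at a space: the body of the `if i == ' '` branch; `none` = the int() ValueError.
def pvFlushA (x num : Int) (tmp : List Char) : Option (Int × Int) :=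
  if 'x' ∈ tmp then
    if tmp.length = 1 then some (x + 1, num)
    else
      match PySem.Int.ofChars? (tmp.filter (fun j => j ≠ 'x')) with
      | none => none
      | some v => some (x + v, num)
  else if tmp ≠ [] then
    match PySem.Int.ofChars? tmp with
    | none => none
    | some v => some (x, num + v)
  else some (x, num)

-- One iteration of A's `for i in strc` loop over state (x, num, tmp); `none` propagates a raise.
def pvStepA (st : Option (Int × Int × List Char)) (i : Char) : Option (Int × Int × List Char) :=
  match st with
  | none => none
  | some (x, num, tmp) =>
    if i = '+' then some (x, num, tmp)
    else if i = ' ' then (pvFlushA x num tmp).map (fun p => (p.1, p.2, ([] : List Char)))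
    else some (x, num, tmp ++ [i])

-- A's final answer-building block.
def pvFmtA (x num : Int) : List Char :=
  let answer : List Char := []
  let answer :=
    if x ≠ 0 then
      (if x = 1 then answer ++ ['x'] else answer ++ PySem.Int.toChars x ++ ['x'])
        ++ (if num ≠ 0 then [' ', '+', ' '] else [])
    else answer
  if num ≠ 0 then answer ++ PySem.Int.toChars num else answer

def solution (strc : String) : String :=
  match (strc.toList ++ [' ']).foldl pvStepA (some (0, 0, ([] : List Char))) with
  | none => ""          -- Python raises ValueError here; excluded by Pre_solution
  | some (x, num, _) => String.ofList (pvFmtA x num)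

-- ===== PORT B =====
-- `1 if t == 'x' else int(t.replace('x', ''))` (replace('x','') is exactly the filter);
-- the getD 0 is reached only where int() raises, i.e. outside Pre_solution.
def pvXCoef (t : List Char) : Int :=
  if t = ['x'] then 1 else (PySem.Int.ofChars? (t.filter (fun c => c ≠ 'x'))).getD 0

-- `int(t)`; the getD 0 is reached only where int() raises, i.e. outside Pre_solution.
def pvNumVal (t : List Char) : Int := (PySem.Int.ofChars? t).getD 0

def solution_alt (strc : String) : String :=
  -- tokens: drop every plus character, then split on spaces
  let tokens := List.splitOn ' ' (strc.toList.filter (fun c => c ≠ '+'))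
  -- x = sum(... for t in tokens if 'x' in t)
  let x := ((tokens.filter (fun t => 'x' ∈ t)).map pvXCoef).sum
  -- num = sum(int(t) for t in tokens if t and 'x' not in t)
  let num := ((tokens.filter (fun t => t ≠ [] ∧ 'x' ∉ t)).map pvNumVal).sum
  -- parts built, then joined with the plus separator
  let parts := (if x ≠ 0 then [if x = 1 then ['x'] else PySem.Int.toChars x ++ ['x']] else [])
             ++ (if num ≠ 0 then [PySem.Int.toChars num] else [])
  String.ofList (List.intercalate [' ', '+', ' '] parts)

-- ===== PRECONDITION & SPEC =====
-- Pre_solution excludes exactly the inputs on which A's int() raises ValueError: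
-- some space-separated token (after dropping every plus character) is neither empty, nor exactly 'x',
-- nor (after dropping every 'x' when it contains one) a valid Python int literal.
def pvTokOK (tok : List Char) : Prop :=
  if 'x' ∈ tok then tok = ['x'] ∨ (PySem.Int.ofChars? (tok.filter (fun c => c ≠ 'x'))).isSome = true
  else tok = [] ∨ (PySem.Int.ofChars? tok).isSome = true

def Pre_solution (strc : String) : Prop :=
  ∀ tok ∈ List.splitOn ' ' (strc.toList.filter (fun c => c ≠ '+')), pvTokOK tok

instance (strc : String) : Decidable (Pre_solution strc) := by unfold Pre_solution pvTokOK; infer_instance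

def pvWitness_solution : String := "3x + 7"

def Spec_solution (strc : String) (out : String) : Prop := out = solution_alt strc
instance (strc : String) (out : String) : Decidable (Spec_solution strc out) := by unfold Spec_solution; infer_instance

-- ===== CLAIM (what is proved, stated in full; the proofs are below) =====
def Claim_equal_solution : Prop := ∀ (strc : String), Dom_solution strc → Pre_solution strc → Spec_solution strc (solution strc)

-- ===== LEMMAS AND PROOFS =====

-- Proof helper: a token-at-a-time fold equivalent to A's space-flush behaviour
-- (used only to bridge A's character loop to B's two sums).
def pvStepB (st : Option (Int × Int)) (tok : List Char) : Option (Int × Int) :=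
  match st with
  | none => none
  | some (x, num) =>
    if 'x' ∈ tok then
      if tok = ['x'] then some (x + 1, num)
      else
        match PySem.Int.ofChars? (tok.filter (fun c => c ≠ 'x')) with
        | none => none
        | some v => some (x + v, num)
    else if tok ≠ [] then
      match PySem.Int.ofChars? tok with
      | none => none
      | some v => some (x, num + v)
    else some (x, num)

theorem pvStepA_none (cs : List Char) : cs.foldl pvStepA none = none := by
  induction cs with
  | nil => rfl
  | cons c cs ih => simpa [pvStepA] using ih

theorem pvStepB_none (toks : List (List Char)) : toks.foldl pvStepB none = none := by
  induction toks with
  | nil => rfl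
  | cons t ts ih => simpa [pvStepB] using ih

-- A's space-branch on buffer tmp computes exactly pvStepB's action on token tmp.
theorem pvFlush_eq_stepB (x num : Int) (tmp : List Char) :
    pvFlushA x num tmp = pvStepB (some (x, num)) tmp := by
  unfold pvFlushA pvStepB
  by_cases hx : 'x' ∈ tmp
  · have hlen : tmp.length = 1 ↔ tmp = ['x'] := by
      cases tmp with
      | nil => simp at hx
      | cons a t =>
        cases t with
        | nil =>
          simp only [List.mem_singleton] at hx
          simp [← hx]
        | cons b t => simp
    simp only [hx, if_pos, hlen]
  · simp [hx]

-- Main loop correspondence: A's char loop over cs ++ [' '] from buffer tmp (with no space in tmp)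
-- equals the token fold over the split of tmp ++ (cs with plus characters dropped).
theorem pv_main (cs : List Char) (x num : Int) (tmp : List Char) (htmp : ' ' ∉ tmp) :
    (cs ++ [' ']).foldl pvStepA (some (x, num, tmp)) =
      ((List.splitOn ' ' (tmp ++ cs.filter (fun c => c ≠ '+'))).foldl pvStepB
          (some (x, num))).map (fun p => (p.1, p.2, ([] : List Char))) := by
  induction cs generalizing x num tmp with
  | nil =>
    have hnosep : ∀ a ∈ tmp, ¬((a == ' ') = true) := by
      intro a ha h
      have h' : a = ' ' := by simpa using h
      exact htmp (h' ▸ ha)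
    have hsingle : List.splitOn ' ' (tmp ++ [].filter (fun c : Char => c ≠ '+')) = [tmp] := by
      simpa [List.splitOn] using List.splitOnP_eq_single (· == ' ') tmp hnosep
    rw [hsingle]
    simp [pvStepA, pvFlush_eq_stepB]
  | cons c cs ih =>
    by_cases hplus : c = '+'
    · subst hplus
      simpa [pvStepA] using ih x num tmp htmp
    · by_cases hsp : c = ' '
      · subst hsp
        have hnosep : ∀ a ∈ tmp, ¬((a == ' ') = true) := by
          intro a ha h
          have h' : a = ' ' := by simpa using h
          exact htmp (h' ▸ ha)
        have hsplit : List.splitOn ' ' (tmp ++ (' ' :: cs).filter (fun c => c ≠ '+')) =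
            tmp :: List.splitOn ' ' (cs.filter (fun c => c ≠ '+')) := by
          simpa [List.splitOn] using
            List.splitOnP_first (· == ' ') tmp hnosep ' ' rfl
              (cs.filter (fun c => c ≠ '+'))
        rw [hsplit]
        cases hfl : pvFlushA x num tmp with
        | none =>
          have hB : pvStepB (some (x, num)) tmp = none := by
            rw [← pvFlush_eq_stepB, hfl]
          simp [pvStepA, hfl, hB, pvStepA_none, pvStepB_none]
        | some p =>
          have hB : pvStepB (some (x, num)) tmp = some p := by
            rw [← pvFlush_eq_stepB, hfl]
          obtain ⟨x', num'⟩ := p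
          simpa [pvStepA, hfl, hB] using ih x' num' [] (by simp)
      · have hnotin : ' ' ∉ tmp ++ [c] := by
          intro h
          rcases List.mem_append.mp h with h | h
          · exact htmp h
          · have h' : ' ' = c := by simpa using h
            exact hsp h'.symm
        have := ih x num (tmp ++ [c]) hnotin
        simpa [pvStepA, hsp, hplus] using this

-- Under Pre_solution's per-token condition, the token fold computes exactly B's two sums.
theorem pvFoldB_sums (toks : List (List Char)) (x num : Int)
    (h : ∀ t ∈ toks, pvTokOK t) :
    toks.foldl pvStepB (some (x, num)) =
      some (x + ((toks.filter (fun t => 'x' ∈ t)).map pvXCoef).sum,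
            num + ((toks.filter (fun t => t ≠ [] ∧ 'x' ∉ t)).map pvNumVal).sum) := by
  induction toks generalizing x num with
  | nil => simp
  | cons t ts ih =>
    have ht := h t (by simp)
    have hts : ∀ u ∈ ts, pvTokOK u := fun u hu => h u (by simp [hu])
    unfold pvTokOK at ht
    by_cases hx : 'x' ∈ t
    · simp only [hx, if_true] at ht
      by_cases h1 : t = ['x']
      · rw [List.foldl_cons]
        have hstep : pvStepB (some (x, num)) t = some (x + 1, num) := by
          simp [pvStepB, h1]
        rw [hstep, ih _ _ hts]
        simp [h1, pvXCoef]
        omega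
      · rcases ht with h1' | h1'
        · exact absurd h1' h1
        · rcases Option.isSome_iff_exists.mp h1' with ⟨v, hv⟩
          rw [List.foldl_cons]
          simp only [ne_eq, decide_not] at hv
          have hstep : pvStepB (some (x, num)) t = some (x + v, num) := by
            simp [pvStepB, hx, h1, hv]
          rw [hstep, ih _ _ hts]
          have hc : pvXCoef t = v := by simp [pvXCoef, h1, hv]
          simp [hx, hc]
          omega
    · simp only [hx, if_false] at ht
      by_cases he : t = []
      · rw [List.foldl_cons]
        have hstep : pvStepB (some (x, num)) t = some (x, num) := by
          simp [pvStepB, he]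
        rw [hstep, ih _ _ hts]
        simp [he]
      · rcases ht with h1' | h1'
        · exact absurd h1' he
        · rcases Option.isSome_iff_exists.mp h1' with ⟨v, hv⟩
          rw [List.foldl_cons]
          have hstep : pvStepB (some (x, num)) t = some (x, num + v) := by
            simp [pvStepB, hx, he, hv]
          rw [hstep, ih _ _ hts]
          have hc : pvNumVal t = v := by simp [pvNumVal, hv]
          simp [hx, he, hc]
          omega

-- A's formatting block equals B's join of the parts list with the plus separator.
theorem pvFmt_eq (x num : Int) :
    pvFmtA x num = List.intercalate [' ', '+', ' ']
      ((if x ≠ 0 then [if x = 1 then ['x'] else PySem.Int.toChars x ++ ['x']] else [])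
       ++ (if num ≠ 0 then [PySem.Int.toChars num] else [])) := by
  unfold pvFmtA
  by_cases hx : x = 0 <;> by_cases hn : num = 0 <;> by_cases h1 : x = 1 <;>
    simp [hx, hn, h1, List.intercalate]

-- ===== VERDICT (by name: the statement is the Claim_ definition above) =====
theorem solution_spec : Claim_equal_solution := by
  intro strc _ hpre
  unfold Spec_solution solution solution_alt
  have hmain := pv_main strc.toList 0 0 [] (by simp)
  simp only [List.nil_append] at hmain
  rw [hmain, pvFoldB_sums _ _ _ hpre]
  simp [pvFmt_eq]
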